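-- pv_equiv track=rewrite | github.com/ph0980/OPE-IndyCar | funilaria/forms.py | validarPlaca
-- ===== SOURCE A (Python) =====
-- def validarPlaca(placa):
--     if not placa:
--         return False
--     bloqueado = '!@#$%¨&*()_+`{}^:><|\,.;~]´[=-" '
--     for i in bloqueado:
--         if i in placa:
--             return False
--     return True
-- ===== SOURCE B (Python) =====
-- BLOCKED = frozenset('!@#$%\u00a8&*()_+`{}^:><|\\,.;~]\u00b4[=-" ')
--
-- def validarPlaca(placa):
--     # One forward pass over the input: every character must be outside BLOCKED.
--     # (A instead iterates over the 32 blocked characters, doing a substring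
--     # search of placa for each.)
--     return bool(placa) and all(c not in BLOCKED for c in placa)
-- ===== Notes on version B (the rewrite author's own statement) =====
-- stated objective: simpler
-- what changed: Inverts the traversal: instead of A's loop over the 32 blocked characters each doing a substring search of placa, B makes a single pass over placa itself, checking every character against a precomputed frozenset of blocked characters via all().
import Mathlib
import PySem

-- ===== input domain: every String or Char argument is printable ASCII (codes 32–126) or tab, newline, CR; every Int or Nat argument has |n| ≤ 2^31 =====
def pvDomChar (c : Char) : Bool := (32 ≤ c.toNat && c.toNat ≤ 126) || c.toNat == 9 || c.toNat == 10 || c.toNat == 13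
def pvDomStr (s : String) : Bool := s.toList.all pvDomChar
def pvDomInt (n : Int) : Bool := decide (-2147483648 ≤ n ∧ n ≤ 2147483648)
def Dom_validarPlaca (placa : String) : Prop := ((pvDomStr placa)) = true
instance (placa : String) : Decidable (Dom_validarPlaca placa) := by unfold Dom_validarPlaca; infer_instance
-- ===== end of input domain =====

-- B inverts the traversal (one pass over placa, each char tested against the blocked set,
-- instead of A's loop over blocked chars doing substring searches); return value only.
-- ===== PORT A =====
def blockedChars : List Char := "!@#$%\u00a8&*()_+`{}^:><|\\,.;~]\u00b4[=-\" ".toList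

-- 'for i in bloqueado: if i in placa: return False' / 'return True'
def scanBlocked (placaL : List Char) : List Char → Bool
  | [] => true
  | i :: rest => if placaL.contains i then false else scanBlocked placaL rest

def validarPlaca (placa : String) : Bool :=
  if placa.toList.isEmpty then false
  else scanBlocked placa.toList blockedChars

-- ===== PORT B =====
-- 'bool(placa) and all(c not in BLOCKED for c in placa)'
def validarPlaca_alt (placa : String) : Bool :=
  !placa.toList.isEmpty && placa.toList.all (fun c => !blockedChars.contains c)

-- ===== PRECONDITION & SPEC =====
def Spec_validarPlaca (placa : String) (out : Bool) : Prop := out = validarPlaca_alt placa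
instance (placa : String) (out : Bool) : Decidable (Spec_validarPlaca placa out) := by unfold Spec_validarPlaca; infer_instance

-- ===== CLAIM (what is proved, stated in full; the proofs are below) =====
def Claim_equal_validarPlaca : Prop := ∀ (placa : String), Dom_validarPlaca placa → Spec_validarPlaca placa (validarPlaca placa)

-- ===== LEMMAS AND PROOFS =====
lemma scanBlocked_eq (pl : List Char) : ∀ bl : List Char,
    scanBlocked pl bl = !bl.any pl.contains := by
  intro bl
  induction bl with
  | nil => rfl
  | cons i rest ih => simp only [scanBlocked, ih, List.any_cons]; split_ifs with h <;> simp_all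

-- ===== VERDICT (by name: the statement is the Claim_ definition above) =====
theorem validarPlaca_spec : Claim_equal_validarPlaca := by
  intro placa _
  unfold Spec_validarPlaca validarPlaca validarPlaca_alt
  split_ifs with h
  · simp [h]
  · rw [scanBlocked_eq, Bool.eq_iff_iff]
    simp only [Bool.and_eq_true, Bool.not_eq_true', List.any_eq_false, List.all_eq_true,
      List.contains_eq_mem, Bool.not_eq_true, decide_eq_false_iff_not, h]
    constructor
    · intro hA
      exact ⟨trivial, fun c hc hcb => hA c hcb hc⟩
    · intro hB i hib hip
      exact hB.2 i hip hib
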